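-- pv_equiv track=rewrite | github.com/rakantleis/lts-release-dashboard | app.py | organise_by_repo
-- ===== SOURCE A (Python) =====
-- REPO_MAP = {
--     "strato-worker":       {"label": "Strato Worker",  "icon": "⚙️"},
--     "strato-webapi":       {"label": "WebAPI",          "icon": "🌐"},
--     "strato-internal-web": {"label": "Internal Web",    "icon": "🖥️"},
-- }
--
-- IGNORE_REPOS = set()
--
-- def organise_by_repo(issues, ticket_repos):
--     repo_columns  = {slug: [] for slug in REPO_MAP}
--     undetected    = []
--     unknown_slugs = []
--     for issue in issues:
--         key   = issue["key"]
--         slugs = ticket_repos.get(key, [])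
--         known   = [s for s in slugs if s in REPO_MAP]
--         unknown = [s for s in slugs if s not in REPO_MAP and s not in IGNORE_REPOS]
--         for u in unknown:
--             if u not in unknown_slugs:
--                 unknown_slugs.append(u)
--         if not known:
--             undetected.append(issue)
--         else:
--             for s in known:
--                 repo_columns[s].append(issue)
--     return repo_columns, undetected, unknown_slugs
-- ===== SOURCE B (Python) =====
-- REPO_MAP = {
--     "strato-worker":       {"label": "Strato Worker",  "icon": "⚙️"},
--     "strato-webapi":       {"label": "WebAPI",          "icon": "🌐"},
--     "strato-internal-web": {"label": "Internal Web",    "icon": "🖥️"},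
-- }
--
-- IGNORE_REPOS = set()
--
-- def organise_by_repo(issues, ticket_repos):
--     repo_columns = {
--         slug: [issue
--                for issue in issues
--                for s in ticket_repos.get(issue["key"], [])
--                if s == slug]
--         for slug in REPO_MAP
--     }
--     undetected = [issue for issue in issues
--                   if not any(s in REPO_MAP
--                              for s in ticket_repos.get(issue["key"], []))]
--     unknown_slugs = list(dict.fromkeys(
--         s
--         for issue in issues
--         for s in ticket_repos.get(issue["key"], [])
--         if s not in REPO_MAP and s not in IGNORE_REPOS))
--     return repo_columns, undetected, unknown_slugs
-- ===== Notes on version B (the rewrite author's own statement) =====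
-- stated objective: alternative
-- what changed: A's single fused loop threading a dict, an undetected list and a dedup list is split into three independent comprehension passes: one per-slug scan building each repo column (once per matching slug occurrence), one filter for undetected issues, and one dict.fromkeys dedup of all unknown slugs.
import Mathlib
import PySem

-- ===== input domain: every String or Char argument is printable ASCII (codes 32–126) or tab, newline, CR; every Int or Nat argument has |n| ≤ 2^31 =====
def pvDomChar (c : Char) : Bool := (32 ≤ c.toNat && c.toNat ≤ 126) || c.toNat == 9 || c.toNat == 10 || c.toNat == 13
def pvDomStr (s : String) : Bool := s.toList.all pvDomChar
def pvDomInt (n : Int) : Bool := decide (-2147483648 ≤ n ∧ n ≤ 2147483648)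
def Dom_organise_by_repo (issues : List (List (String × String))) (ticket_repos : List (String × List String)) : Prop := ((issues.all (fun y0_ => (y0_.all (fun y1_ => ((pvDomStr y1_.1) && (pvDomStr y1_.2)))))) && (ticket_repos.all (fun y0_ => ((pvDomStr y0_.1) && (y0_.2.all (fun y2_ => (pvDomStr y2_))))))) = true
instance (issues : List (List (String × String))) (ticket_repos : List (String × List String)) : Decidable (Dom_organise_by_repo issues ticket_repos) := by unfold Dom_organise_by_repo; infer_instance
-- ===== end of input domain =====

-- B splits A's single fused loop into three independent passes (per-slug column scans, an
-- undetected filter, and a dedup of all unknown slugs); same cost class, different decomposition.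

-- ===== PORT A =====
-- keys of REPO_MAP in insertion order (the values of REPO_MAP never influence the result)
def pvRepoKeys : List String := ["strato-worker", "strato-webapi", "strato-internal-web"]
-- IGNORE_REPOS = set()
def pvIgnoreRepos : PySem.Set String := PySem.Set.empty
-- 's in REPO_MAP'
def pvInRepoMap (s : String) : Bool := pvRepoKeys.contains s

-- the body of A's 'for issue in issues' loop, threading (repo_columns, undetected, unknown_slugs)
def pvStepA (ticket_repos : List (String × List String))
    (st : PySem.Dict String (List (List (String × String))) × List (List (String × String)) × List String)
    (issue : List (String × String)) :
    PySem.Dict String (List (List (String × String))) × List (List (String × String)) × List String :=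
  -- key = issue["key"]  (KeyError, i.e. lookup = none, is excluded by Pre_; .getD "" is never taken there)
  let key : String := (List.lookup "key" issue).getD ""
  -- slugs = ticket_repos.get(key, [])
  let slugs : List String := (List.lookup key ticket_repos).getD []
  let known : List String := slugs.filter (fun s => pvInRepoMap s)
  let unknown : List String := slugs.filter (fun s => !pvInRepoMap s && !(PySem.Set.contains pvIgnoreRepos s))
  let unk : List String := unknown.foldl (fun u s => if u.contains s then u else u ++ [s]) st.2.2
  if known.isEmpty then (st.1, st.2.1 ++ [issue], unk)
  else (known.foldl (fun c s => c.modify s [] (fun l => l ++ [issue])) st.1, st.2.1, unk)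

def organise_by_repo (issues : List (List (String × String))) (ticket_repos : List (String × List String)) : (List (String × List (List (String × String)))) × (List (List (String × String))) × List String :=
  -- repo_columns = {slug: [] for slug in REPO_MAP}
  let repo_columns0 : PySem.Dict String (List (List (String × String))) :=
    pvRepoKeys.foldl (fun d slug => d.insert slug []) PySem.Dict.empty
  let st := issues.foldl (pvStepA ticket_repos) (repo_columns0, [], [])
  (st.1.items, st.2.1, st.2.2)

-- ===== PORT B =====
-- ticket_repos.get(issue["key"], [])
def pvSlugsOf (ticket_repos : List (String × List String)) (issue : List (String × String)) : List String :=
  (List.lookup ((List.lookup "key" issue).getD "") ticket_repos).getD []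

def organise_by_repo_alt (issues : List (List (String × String))) (ticket_repos : List (String × List String)) : (List (String × List (List (String × String)))) × (List (List (String × String))) × List String :=
  (pvRepoKeys.map (fun slug =>
      (slug, issues.flatMap (fun issue =>
        ((pvSlugsOf ticket_repos issue).filter (fun s => s == slug)).map (fun _ => issue)))),
   issues.filter (fun issue => !((pvSlugsOf ticket_repos issue).any pvInRepoMap)),
   PySem.List.dedup (issues.flatMap (fun issue =>
     (pvSlugsOf ticket_repos issue).filter (fun s => !pvInRepoMap s && !(PySem.Set.contains pvIgnoreRepos s)))))

-- ===== PRECONDITION & SPEC =====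
-- Pre_ excludes exactly the inputs where Python's issue["key"] raises KeyError: every issue dict must contain the key "key".
def Pre_organise_by_repo (issues : List (List (String × String))) (ticket_repos : List (String × List String)) : Prop :=
  (issues.all (fun issue => (List.lookup "key" issue).isSome)) = true
instance (issues : List (List (String × String))) (ticket_repos : List (String × List String)) : Decidable (Pre_organise_by_repo issues ticket_repos) := by unfold Pre_organise_by_repo; infer_instance

def pvWitness_organise_by_repo : (List (List (String × String))) × (List (String × List String)) :=
  ([[("key", "T1")], [("key", "T2")]], [("T1", ["strato-worker", "mystery"]), ("T2", [])])

def Spec_organise_by_repo (issues : List (List (String × String))) (ticket_repos : List (String × List String)) (out : (List (String × List (List (String × String)))) × (List (List (String × String))) × List String) : Prop := out = organise_by_repo_alt issues ticket_repos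
instance (issues : List (List (String × String))) (ticket_repos : List (String × List String)) (out : (List (String × List (List (String × String)))) × (List (List (String × String))) × List String) : Decidable (Spec_organise_by_repo issues ticket_repos out) := by unfold Spec_organise_by_repo; infer_instance

-- ===== CLAIM (what is proved, stated in full; the proofs are below) =====
def Claim_equal_organise_by_repo : Prop := ∀ (issues : List (List (String × String))) (ticket_repos : List (String × List String)), Dom_organise_by_repo issues ticket_repos → Pre_organise_by_repo issues ticket_repos → Spec_organise_by_repo issues ticket_repos (organise_by_repo issues ticket_repos)


-- ===== LEMMAS AND PROOFS =====

-- (l.filter p).isEmpty = !l.any p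
theorem pv_isEmpty_filter {α : Type} (p : α → Bool) (l : List α) :
    (l.filter p).isEmpty = !(l.any p) := by
  induction l with
  | nil => rfl
  | cons x t ih => by_cases h : p x <;> simp [h, ih]

-- Set.update leaves a set unchanged when every added element is already present
theorem pv_update_of_contains (s : PySem.Set String) (l : List String)
    (h : ∀ x ∈ l, s.contains x = true) : PySem.Set.update s l = s := by
  induction l generalizing s with
  | nil => rfl
  | cons x t ih =>
      have hx : x ∈ s := List.mem_of_elem_eq_true (h x (by simp))
      have hadd : PySem.Set.add s x = s := by simp [PySem.Set.add, hx]
      have hstep : PySem.Set.update s (x :: t) = PySem.Set.update (PySem.Set.add s x) t := rfl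
      rw [hstep, hadd]
      exact ih s (fun y hy => h y (List.mem_cons_of_mem _ hy))

-- a slug equal to a REPO_MAP key is itself in REPO_MAP: filter (== k) refines filter pvInRepoMap
theorem pv_filter_eq_key (slugs : List String) (k : String) (hk : k ∈ pvRepoKeys) :
    (slugs.filter (fun s => pvInRepoMap s)).filter (fun s => s == k) =
      slugs.filter (fun s => s == k) := by
  rw [List.filter_filter]
  apply List.filter_congr
  intro s _
  by_cases hb : (s == k) = true
  · have : pvInRepoMap s = true := by
      rw [eq_of_beq hb]; simp [pvInRepoMap, hk]
    simp [hb, this]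
  · simp at hb
    simp [hb]

-- if no slug of the issue is in REPO_MAP, no slug equals a REPO_MAP key
theorem pv_filter_eq_key_nil (slugs : List String) (k : String) (hk : k ∈ pvRepoKeys)
    (h : slugs.filter (fun s => pvInRepoMap s) = []) :
    slugs.filter (fun s => s == k) = [] := by
  rw [← pv_filter_eq_key slugs k hk, h]
  rfl

-- the fused-loop invariant: running A's fold from any state whose dict has keys pvRepoKeys
theorem pv_loop_inv (tr : List (String × List String)) (issues : List (List (String × String))) :
    ∀ (d : PySem.Dict String (List (List (String × String)))) (und : List (List (String × String))) (unk : List String),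
      d.keys = pvRepoKeys →
      (issues.foldl (pvStepA tr) (d, und, unk)).1.keys = pvRepoKeys ∧
      (∀ k ∈ pvRepoKeys, (issues.foldl (pvStepA tr) (d, und, unk)).1.getD k [] =
        d.getD k [] ++ issues.flatMap (fun issue =>
          ((pvSlugsOf tr issue).filter (fun s => s == k)).map (fun _ => issue))) ∧
      (issues.foldl (pvStepA tr) (d, und, unk)).2.1 =
        und ++ issues.filter (fun issue => !((pvSlugsOf tr issue).any pvInRepoMap)) ∧
      (issues.foldl (pvStepA tr) (d, und, unk)).2.2 =
        (issues.flatMap (fun issue =>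
          (pvSlugsOf tr issue).filter (fun s => !pvInRepoMap s && !(PySem.Set.contains pvIgnoreRepos s)))).foldl PySem.Set.add unk := by
  induction issues with
  | nil => intro d und unk hkeys; simp [hkeys]
  | cons i rest ih =>
      intro d und unk hkeys
      have hslugs : pvSlugsOf tr i = (List.lookup ((List.lookup "key" i).getD "") tr).getD [] := rfl
      set slugs := pvSlugsOf tr i with hs
      -- the new unknown_slugs accumulator after issue i (A's inner membership loop IS Set.add)
      have hunk : ∀ (st : PySem.Dict String (List (List (String × String))) × List (List (String × String)) × List String),
          (pvStepA tr st i).2.2 =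
            (slugs.filter (fun s => !pvInRepoMap s && !(PySem.Set.contains pvIgnoreRepos s))).foldl PySem.Set.add st.2.2 := by
        intro st
        by_cases hk : (slugs.filter (fun s => pvInRepoMap s)).isEmpty <;>
          (simp [pvStepA, ← hslugs, ← hs, hk]; congr 1; funext u s; simp [PySem.Set.add])
      by_cases hk : (slugs.filter (fun s => pvInRepoMap s)).isEmpty = true
      · -- known is empty: issue goes to undetected, dict unchanged
        have hknil : slugs.filter (fun s => pvInRepoMap s) = [] := by
          simpa [List.isEmpty_iff] using hk
        have hstep : pvStepA tr (d, und, unk) i =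
            (d, und ++ [i], (slugs.filter (fun s => !pvInRepoMap s && !(PySem.Set.contains pvIgnoreRepos s))).foldl PySem.Set.add unk) := by
          have := hunk (d, und, unk)
          simp [pvStepA, ← hslugs, hk] at this ⊢
          exact this
        have hany : (!(slugs.any pvInRepoMap)) = true := by
          rw [← pv_isEmpty_filter]; exact hk
        obtain ⟨h1, h2, h3, h4⟩ := ih d (und ++ [i])
          ((slugs.filter (fun s => !pvInRepoMap s && !(PySem.Set.contains pvIgnoreRepos s))).foldl PySem.Set.add unk) hkeys
        refine ⟨?_, ?_, ?_, ?_⟩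
        · rw [List.foldl_cons, hstep]; exact h1
        · intro k hkmem
          rw [List.foldl_cons, hstep, h2 k hkmem]
          rw [List.flatMap_cons, ← hs, pv_filter_eq_key_nil slugs k hkmem hknil]
          simp
        · rw [List.foldl_cons, hstep, h3]
          rw [List.filter_cons, ← hs, hany]
          simp
        · rw [List.foldl_cons, hstep, h4]
          rw [List.flatMap_cons, ← hs, List.foldl_append]
      · -- known nonempty: the issue is appended to each matching column
        have hkne := hk
        set known := slugs.filter (fun s => pvInRepoMap s) with hkn
        set d' := known.foldl (fun c s => c.modify s [] (fun l => l ++ [i])) d with hd'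
        have hstep : pvStepA tr (d, und, unk) i =
            (d', und, (slugs.filter (fun s => !pvInRepoMap s && !(PySem.Set.contains pvIgnoreRepos s))).foldl PySem.Set.add unk) := by
          have := hunk (d, und, unk)
          simp [pvStepA, ← hslugs, ← hkn, hk] at this ⊢
          exact ⟨rfl, this⟩
        have hd'keys : d'.keys = pvRepoKeys := by
          rw [hd', PySem.Dict.keys_foldl_modify known [] (fun _ _ => (fun l => l ++ [i])) d, hkeys]
          apply pv_update_of_contains
          intro x hx
          have hxin : pvInRepoMap x = true := (List.mem_filter.mp (hkn ▸ hx)).2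
          simpa [pvInRepoMap, List.elem_eq_contains] using hxin
        have hd'getD : ∀ k ∈ pvRepoKeys, d'.getD k [] =
            d.getD k [] ++ (slugs.filter (fun s => s == k)).map (fun _ => i) := by
          intro k hkmem
          have hfm : d' = (known.map (fun s => (s, i))).foldl
              (fun c p => c.modify p.1 [] (fun l => l ++ [p.2])) d := by
            rw [hd', List.foldl_map]
          rw [hfm, PySem.Dict.getD_foldl_modify_append]
          congr 1
          rw [List.filter_map, List.map_map]
          simp only [Function.comp_def]
          rw [hkn, pv_filter_eq_key slugs k hkmem]
        obtain ⟨h1, h2, h3, h4⟩ := ih d' und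
          ((slugs.filter (fun s => !pvInRepoMap s && !(PySem.Set.contains pvIgnoreRepos s))).foldl PySem.Set.add unk) hd'keys
        refine ⟨?_, ?_, ?_, ?_⟩
        · rw [List.foldl_cons, hstep]; exact h1
        · intro k hkmem
          rw [List.foldl_cons, hstep, h2 k hkmem, hd'getD k hkmem]
          rw [List.flatMap_cons, ← hs]
          simp [List.append_assoc]
        · rw [List.foldl_cons, hstep, h3]
          have hany : (!(slugs.any pvInRepoMap)) = false := by
            rw [← pv_isEmpty_filter, ← hkn]
            simpa using hkne
          rw [List.filter_cons, ← hs, hany]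
          simp
        · rw [List.foldl_cons, hstep, h4]
          rw [List.flatMap_cons, ← hs, List.foldl_append]

-- a dict with Nodup keys is its key list paired with its getD values
theorem pv_items_eq_map_keys {v : Type} (d : PySem.Dict String v) (dflt : v)
    (h : d.keys.Nodup) : d.items = d.keys.map (fun k => (k, d.getD k dflt)) := by
  apply List.ext_getElem
  · simp [PySem.Dict.keys]
  · intro i h1 h2
    have hmem : (d.items[i].1, d.items[i].2) ∈ d.items := by simpa using List.getElem_mem h1
    have hg := PySem.Dict.getD_of_mem_items d hmem h dflt
    simp only [PySem.Dict.keys, List.getElem_map]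
    rw [hg]

-- the initial dict {slug: [] for slug in REPO_MAP} answers [] at every key
theorem pv_init_getD (k : String) :
    (pvRepoKeys.foldl (fun d slug => d.insert slug []) PySem.Dict.empty
      : PySem.Dict String (List (List (String × String)))).getD k [] = [] := by
  simp only [pvRepoKeys, List.foldl_cons, List.foldl_nil]
  simp [PySem.Dict.getD_insert]

-- ===== VERDICT (by name: the statement is the Claim_ definition above) =====
theorem organise_by_repo_spec : Claim_equal_organise_by_repo := by
  intro issues tr _ _
  unfold Spec_organise_by_repo organise_by_repo organise_by_repo_alt
  have hkeys0 : (pvRepoKeys.foldl (fun d slug => d.insert slug []) PySem.Dict.empty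
      : PySem.Dict String (List (List (String × String)))).keys = pvRepoKeys := by decide
  obtain ⟨h1, h2, h3, h4⟩ := pv_loop_inv tr issues _ [] [] hkeys0
  refine Prod.ext ?_ (Prod.ext ?_ ?_) <;> dsimp only
  · -- repo_columns.items
    have hnd : (issues.foldl (pvStepA tr)
        ((pvRepoKeys.foldl (fun d slug => d.insert slug []) PySem.Dict.empty), [], [])).1.keys.Nodup := by
      rw [h1]; decide
    rw [pv_items_eq_map_keys _ [] hnd, h1]
    apply List.map_congr_left
    intro k hkmem
    rw [h2 k hkmem, pv_init_getD k]
    simp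
  · rw [h3]; simp
  · rw [h4, ← PySem.Set.ofList_eq_foldl, ← PySem.List.dedup_eq_ofList]
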